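-- pv_equiv track=rewrite | github.com/StankWizardLizard/VNL1-2022-HOPUR-28 | RU_Basement_Open/ui/captain/captain_match_edit_ui.py | validate_quality_point_string
-- ===== SOURCE A (Python) =====
-- def validate_quality_point_string(string):
--     # split string from all the spaces
--     quality_points = string.split()
--
--     # check if empty
--     if(len(quality_points) == 0):
--         return False
--
--     # Iterate through points
--     for quality_point in quality_points:
--
--         # innshot check
--         if(len(quality_point.split("i")) > 1):
--             point = quality_point.split("i")[0]
--             if(point.isnumeric()):
--                 point = int(point)
--                 if(point <= 0 or point >= 171):
--                     return False
--             else: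
--                 return False
--
--         # outshot check
--         if(len(quality_point.split("u")) > 1):
--             point = quality_point.split("u")[0]
--             if(point.isnumeric()):
--                 point = int(point)
--                 if(point <= 0 or point >= 171):
--                     return False
--             else:
--                 return False
--
--
--         # bullseye check
--         if(len(quality_point.split("b")) > 1):
--             point = quality_point.split("b")[0]
--             if(point.isnumeric()):
--                 point = int(point)
--                 if(point <= 0 or point >= 10):
--                     return False
--             else:
--                 return False
--
--         # highshot check
--         if(len(quality_point.split("h")) > 1):
--             point = quality_point.split("h")[0]
--             if(point.isnumeric()):
--                 point = int(point)
--                 if(point <= 0 or point >= 7):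
--                     return False
--             else:
--                 return False
--
--         # check if its just letters
--         if(quality_point.isalpha()):
--             return False
--
--         # norm check
--         if(quality_point.isnumeric()):
--             point = int(quality_point)
--             if(point <= 0 or point >= 181):
--                 return False
--
--
--     return True
-- ===== SOURCE B (Python) =====
-- _BOUNDS = (('i', 171), ('u', 171), ('b', 10), ('h', 7))
--
--
-- def _token_ok(t):
--     # split the token once into its leading digit run and the remainder
--     cut = 0
--     while cut < len(t) and t[cut].isdigit():
--         cut += 1
--     digits, rest = t[:cut], t[cut:]
--     present = [(letter, bound) for letter, bound in _BOUNDS if letter in rest]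
--     if present:
--         # a shot letter is valid only if it is the first non-digit character
--         # and the digit run before it is a point value inside its bound
--         if len(present) > 1:
--             return False
--         letter, bound = present[0]
--         if cut == 0 or rest[0] != letter:
--             return False
--         return 0 < int(digits) < bound
--     if t.isalpha():
--         return False
--     if t.isnumeric():
--         return 0 < int(t) < 181
--     return True
--
--
-- def validate_quality_point_string(string):
--     tokens = string.split()
--     if not tokens:
--         return False
--     return all(_token_ok(t) for t in tokens)
-- ===== Notes on version B (the rewrite author's own statement) =====
-- stated objective: simpler
-- what changed: B replaces A's four copy-pasted split-based letter blocks by one scan that splits each token into its leading digit run and the rest, then checks the (at most one) shot letter from a bounds table against that run, keeping the alpha/numeric tail checks.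
import Mathlib
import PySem

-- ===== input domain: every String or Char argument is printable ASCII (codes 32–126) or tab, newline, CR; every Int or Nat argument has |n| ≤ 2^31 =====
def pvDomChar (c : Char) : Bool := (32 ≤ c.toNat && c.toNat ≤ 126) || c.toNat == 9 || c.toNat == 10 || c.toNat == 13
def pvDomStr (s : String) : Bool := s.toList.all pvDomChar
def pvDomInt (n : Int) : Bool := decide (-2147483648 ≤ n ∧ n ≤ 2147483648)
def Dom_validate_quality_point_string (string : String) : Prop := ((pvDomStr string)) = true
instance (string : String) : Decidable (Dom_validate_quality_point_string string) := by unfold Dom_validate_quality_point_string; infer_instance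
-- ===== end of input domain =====

-- B replaces A's four copy-pasted split-based letter blocks by one digit-prefix scan
-- checked against a bounds table (objective: simpler); equivalence proved on all strings.


-- ===== PORT A =====
-- per-token loop body of A; each early `return False` becomes `false`, falling
-- through a block continues into the next helper (the next statement of A's body).
-- Python's isnumeric is ported as strIsdigit (exact on the ASCII domain);
-- `int(point)` is guarded by isnumeric, so `(ofChars? …).getD 0` is exact there;
-- `split(…)[0]` is `headI` (str.split always returns a nonempty list).

-- norm check (the last two statements of A's loop body)
def pvATail (quality_point : List Char) : Bool :=
  if PySem.Chars.strIsalpha quality_point then false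
  else if PySem.Chars.strIsdigit quality_point then
    let point := (PySem.Int.ofChars? quality_point).getD 0
    if point ≤ 0 || point ≥ 181 then false else true
  else true

-- highshot check
def pvAH (quality_point : List Char) : Bool :=
  if (PySem.Chars.splitOn quality_point ['h']).length > 1 then
    let point := (PySem.Chars.splitOn quality_point ['h']).headI
    if PySem.Chars.strIsdigit point then
      let point := (PySem.Int.ofChars? point).getD 0
      if point ≤ 0 || point ≥ 7 then false else pvATail quality_point
    else false
  else pvATail quality_point

-- bullseye check
def pvAB (quality_point : List Char) : Bool :=
  if (PySem.Chars.splitOn quality_point ['b']).length > 1 then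
    let point := (PySem.Chars.splitOn quality_point ['b']).headI
    if PySem.Chars.strIsdigit point then
      let point := (PySem.Int.ofChars? point).getD 0
      if point ≤ 0 || point ≥ 10 then false else pvAH quality_point
    else false
  else pvAH quality_point

-- outshot check
def pvAU (quality_point : List Char) : Bool :=
  if (PySem.Chars.splitOn quality_point ['u']).length > 1 then
    let point := (PySem.Chars.splitOn quality_point ['u']).headI
    if PySem.Chars.strIsdigit point then
      let point := (PySem.Int.ofChars? point).getD 0
      if point ≤ 0 || point ≥ 171 then false else pvAB quality_point
    else false
  else pvAB quality_point

-- innshot check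
def pvAI (quality_point : List Char) : Bool :=
  if (PySem.Chars.splitOn quality_point ['i']).length > 1 then
    let point := (PySem.Chars.splitOn quality_point ['i']).headI
    if PySem.Chars.strIsdigit point then
      let point := (PySem.Int.ofChars? point).getD 0
      if point ≤ 0 || point ≥ 171 then false else pvAU quality_point
    else false
  else pvAU quality_point

def validate_quality_point_string (string : String) : Bool :=
  let quality_points := PySem.Chars.split₀ string.toList
  if quality_points.length == 0 then false
  else quality_points.all pvAI    -- the for-loop: False on the first failing token, else True

-- ===== PORT B =====
def pvBounds : List (Char × Int) := [('i', 171), ('u', 171), ('b', 10), ('h', 7)]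

-- _token_ok of Source B; the while-loop computing `cut` is the digit-prefix takeWhile,
-- `letter in rest` is PySem.Chars.isIn, rest[0] is headI (rest is nonempty whenever read)
def pvTokenOk (t : List Char) : Bool :=
  let digits := t.takeWhile PySem.Chars.isdigit
  let rest := t.drop digits.length
  let present := pvBounds.filter (fun lb => PySem.Chars.isIn [lb.1] rest)
  match present with
  | [] =>
    if PySem.Chars.strIsalpha t then false
    else if PySem.Chars.strIsdigit t then
      decide (0 < (PySem.Int.ofChars? t).getD 0 ∧ (PySem.Int.ofChars? t).getD 0 < 181)
    else true
  | (letter, bound) :: more =>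
    if more.length > 0 then false
    else if digits.length = 0 ∨ rest.headI ≠ letter then false
    else decide (0 < (PySem.Int.ofChars? digits).getD 0 ∧ (PySem.Int.ofChars? digits).getD 0 < bound)

def validate_quality_point_string_alt (string : String) : Bool :=
  let tokens := PySem.Chars.split₀ string.toList
  if tokens.isEmpty then false
  else tokens.all pvTokenOk

-- ===== PRECONDITION & SPEC =====
def Spec_validate_quality_point_string (string : String) (out : Bool) : Prop := out = validate_quality_point_string_alt string
instance (string : String) (out : Bool) : Decidable (Spec_validate_quality_point_string string out) := by unfold Spec_validate_quality_point_string; infer_instance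

-- ===== CLAIM (what is proved, stated in full; the proofs are below) =====
def Claim_equal_validate_quality_point_string : Prop := ∀ (string : String), Dom_validate_quality_point_string string → Spec_validate_quality_point_string string (validate_quality_point_string string)

-- ===== LEMMAS AND PROOFS =====

-- a simple structural model of Python's str.split with a single-character separator
def pvSplitC (l : Char) : List Char → List (List Char)
  | [] => [[]]
  | c :: rest =>
    if c = l then [] :: pvSplitC l rest
    else
      match pvSplitC l rest with
      | [] => [[c]]
      | p :: ps => (c :: p) :: ps

theorem pvSplitC_ne_nil (l : Char) (t : List Char) : pvSplitC l t ≠ [] := by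
  cases t with
  | nil => simp [pvSplitC]
  | cons c rest =>
    simp only [pvSplitC]
    split
    · simp
    · split <;> simp

theorem pvGo_eq (l : Char) (t : List Char) : ∀ (fuel : Nat), t.length ≤ fuel →
    ∀ (cur : List Char) (acc : List (List Char)),
    PySem.Chars.splitOn.go [l] fuel t cur acc =
      acc.reverse ++
        (match pvSplitC l t with
         | [] => [cur.reverse]
         | p :: ps => (cur.reverse ++ p) :: ps) := by
  induction t with
  | nil =>
    intro fuel _ cur acc
    cases fuel <;> simp [PySem.Chars.splitOn.go, pvSplitC]
  | cons c rest ih =>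
    intro fuel hf cur acc
    cases fuel with
    | zero => simp at hf
    | succ f =>
      have hf' : rest.length ≤ f := by simpa using hf
      by_cases hc : c = l
      · subst hc
        simp only [PySem.Chars.splitOn.go, List.isPrefixOf, BEq.rfl, Bool.and_self, if_true]
        simp only [List.length_cons, List.length_nil, List.drop_succ_cons, List.drop_zero]
        rw [ih f hf' [] (cur.reverse :: acc)]
        rcases h : pvSplitC c rest with _ | ⟨p, ps⟩
        · exact absurd h (pvSplitC_ne_nil c rest)
        · simp [pvSplitC, h]
      · have hpre : ([l].isPrefixOf (c :: rest)) = false := by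
          simp [List.isPrefixOf]
          exact fun h => absurd h.symm hc
        simp only [PySem.Chars.splitOn.go, hpre, Bool.false_eq_true, if_false]
        rw [ih f hf' (c :: cur) acc]
        rcases h : pvSplitC l rest with _ | ⟨p, ps⟩
        · exact absurd h (pvSplitC_ne_nil l rest)
        · simp [pvSplitC, hc, h]

theorem pvSplitOn_eq (l : Char) (t : List Char) :
    PySem.Chars.splitOn t [l] = pvSplitC l t := by
  unfold PySem.Chars.splitOn
  rw [pvGo_eq l t (t.length + 1) (by omega) [] []]
  rcases h : pvSplitC l t with _ | ⟨p, ps⟩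
  · exact absurd h (pvSplitC_ne_nil l t)
  · simp

theorem pvSplitC_length (l : Char) (t : List Char) :
    1 < (pvSplitC l t).length ↔ l ∈ t := by
  induction t with
  | nil => simp [pvSplitC]
  | cons c rest ih =>
    simp only [pvSplitC]
    by_cases hc : c = l
    · subst hc
      have := pvSplitC_ne_nil c rest
      simp [List.length_pos_iff.mpr this]
    · rcases h : pvSplitC l rest with _ | ⟨p, ps⟩
      · exact absurd h (pvSplitC_ne_nil l rest)
      · simp [hc, h, Ne.symm hc] at ih ⊢
        simpa using ih

theorem pvSplitC_headI (l : Char) (t : List Char) :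
    (pvSplitC l t).headI = t.takeWhile (fun x => !decide (x = l)) := by
  induction t with
  | nil => simp [pvSplitC]
  | cons c rest ih =>
    simp only [pvSplitC]
    by_cases hc : c = l
    · subst hc; simp
    · rcases h : pvSplitC l rest with _ | ⟨p, ps⟩
      · exact absurd h (pvSplitC_ne_nil l rest)
      · simp [hc, h] at ih ⊢
        simpa [hc] using ih

-- the digit prefix / first-letter characterisation of A's per-letter split check
theorem pvPassChar (l : Char) (hl : PySem.Chars.isdigit l = false) :
    ∀ t : List Char, l ∈ t →
    ((PySem.Chars.strIsdigit (t.takeWhile (fun x => !decide (x = l))) = true ↔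
        (t.takeWhile PySem.Chars.isdigit ≠ [] ∧
         (t.drop (t.takeWhile PySem.Chars.isdigit).length).headI = l))
     ∧ (t.takeWhile PySem.Chars.isdigit ≠ [] →
        (t.drop (t.takeWhile PySem.Chars.isdigit).length).headI = l →
        t.takeWhile (fun x => !decide (x = l)) = t.takeWhile PySem.Chars.isdigit)) := by
  intro t
  induction t with
  | nil => intro h; cases h
  | cons c rest ih =>
    intro hmem
    by_cases hc : c = l
    · subst hc
      simp [hl, PySem.Chars.strIsdigit]
    · have hmem' : l ∈ rest := by
        rcases List.mem_cons.mp hmem with h | h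
        · exact absurd h.symm hc
        · exact h
      have IH := ih hmem'
      by_cases hd : PySem.Chars.isdigit c = true
      · by_cases hpre : rest.takeWhile (fun x => !decide (x = l)) = []
        · have hhead : rest.headI = l := by
            cases rest with
            | nil => cases hmem'
            | cons d r =>
              by_cases h2 : d = l
              · simpa using h2
              · simp [h2] at hpre
          have hD' : rest.takeWhile PySem.Chars.isdigit = [] := by
            cases rest with
            | nil => rfl
            | cons d r =>
              have hdl : d = l := by simpa using hhead
              simp [hdl, hl]
          constructor
          · simp [hc, hpre, hd, hD', PySem.Chars.strIsdigit, hhead]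
          · intro _ _
            simp [hc, hpre, hd, hD']
        · have hhead : rest.headI ≠ l := by
            cases rest with
            | nil => cases hmem'
            | cons d r =>
              by_cases h2 : d = l
              · simp [h2] at hpre
              · simpa using h2
          have hD'ne : (rest.drop (rest.takeWhile PySem.Chars.isdigit).length).headI = l →
              rest.takeWhile PySem.Chars.isdigit ≠ [] := by
            intro hh hD'
            rw [hD'] at hh
            simp at hh
            exact hhead hh
          have hstep : PySem.Chars.strIsdigit ((c :: rest).takeWhile (fun x => !decide (x = l))) =
              PySem.Chars.strIsdigit (rest.takeWhile (fun x => !decide (x = l))) := by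
            simp [List.takeWhile_cons, hc, PySem.Chars.strIsdigit, hd, hpre]
          constructor
          · rw [hstep]
            rw [IH.1]
            constructor
            · rintro ⟨hD'nenil, hh⟩
              exact ⟨by simp [List.takeWhile_cons, hd], by simpa [List.takeWhile_cons, hd] using hh⟩
            · rintro ⟨_, hh⟩
              have hh' : (rest.drop (rest.takeWhile PySem.Chars.isdigit).length).headI = l := by
                simpa [List.takeWhile_cons, hd] using hh
              exact ⟨hD'ne hh', hh'⟩
          · intro _ hh
            have hh' : (rest.drop (rest.takeWhile PySem.Chars.isdigit).length).headI = l := by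
              simpa [List.takeWhile_cons, hd] using hh
            have := IH.2 (hD'ne hh') hh'
            simp [List.takeWhile_cons, hc, hd, this]
      · have hdf : PySem.Chars.isdigit c = false := by simpa using hd
        constructor
        · simp [hc, hdf, PySem.Chars.strIsdigit]
        · simp [hdf]

-- the value of one of A's letter blocks, as a standalone Bool
def pvBlockP (t : List Char) (l : Char) (b : Int) : Bool :=
  if l ∈ t then
    (if PySem.Chars.strIsdigit (t.takeWhile (fun x => !decide (x = l))) then
      !((PySem.Int.ofChars? (t.takeWhile (fun x => !decide (x = l)))).getD 0 ≤ 0 ||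
        (PySem.Int.ofChars? (t.takeWhile (fun x => !decide (x = l)))).getD 0 ≥ b)
     else false)
  else true

theorem pvChainH (t : List Char) : pvAH t = (pvBlockP t 'h' 7 && pvATail t) := by
  unfold pvAH pvBlockP
  simp only [pvSplitOn_eq, pvSplitC_length, pvSplitC_headI, gt_iff_lt]
  split_ifs <;> simp_all
  all_goals (intro h1 h2; cases ‹_ ∨ _› <;> omega)

theorem pvChainB (t : List Char) : pvAB t = (pvBlockP t 'b' 10 && pvAH t) := by
  unfold pvAB pvBlockP
  simp only [pvSplitOn_eq, pvSplitC_length, pvSplitC_headI, gt_iff_lt]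
  split_ifs <;> simp_all
  all_goals (intro h1 h2; cases ‹_ ∨ _› <;> omega)

theorem pvChainU (t : List Char) : pvAU t = (pvBlockP t 'u' 171 && pvAB t) := by
  unfold pvAU pvBlockP
  simp only [pvSplitOn_eq, pvSplitC_length, pvSplitC_headI, gt_iff_lt]
  split_ifs <;> simp_all
  all_goals (intro h1 h2; cases ‹_ ∨ _› <;> omega)

theorem pvChainI (t : List Char) : pvAI t = (pvBlockP t 'i' 171 && pvAU t) := by
  unfold pvAI pvBlockP
  simp only [pvSplitOn_eq, pvSplitC_length, pvSplitC_headI, gt_iff_lt]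
  split_ifs <;> simp_all
  all_goals (intro h1 h2; cases ‹_ ∨ _› <;> omega)

theorem pvDropTake (p : Char → Bool) (t : List Char) :
    t.drop (t.takeWhile p).length = t.dropWhile p := by
  induction t with
  | nil => simp
  | cons c r ih => by_cases h : p c <;> simp [h, ih]

theorem pvMemRest (l : Char) (hl : PySem.Chars.isdigit l = false) (t : List Char) :
    (l ∈ t.drop (t.takeWhile PySem.Chars.isdigit).length) ↔ l ∈ t := by
  rw [pvDropTake]
  constructor
  · intro h
    exact (List.dropWhile_suffix _).subset h
  · intro h
    have := List.takeWhile_append_dropWhile (p := PySem.Chars.isdigit) (l := t)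
    rcases (List.mem_append.mp (this ▸ h)) with h1 | h1
    · exact absurd (List.mem_takeWhile_imp h1) (by simp [hl])
    · exact h1

theorem pvIsInSingle (l : Char) (s : List Char) :
    PySem.Chars.isIn [l] s = decide (l ∈ s) := by
  by_cases h : l ∈ s
  · simp only [h, decide_true]
    rw [PySem.Chars.isIn_iff_infix]
    obtain ⟨a, b, rfl⟩ := List.append_of_mem h
    exact ⟨a, b, by simp⟩
  · simp only [h, decide_false]
    rw [PySem.Chars.isIn_eq_false_iff]
    intro hin
    exact h (hin.mem (List.mem_singleton_self l))

theorem pvDigitNotAlpha (c : Char) (h : PySem.Chars.isdigit c = true) :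
    PySem.Chars.isalpha c = false := by
  simp [PySem.Chars.isdigit, PySem.Chars.isalpha, PySem.Chars.isupper, PySem.Chars.islower,
    Char.le_def, UInt32.le_iff_toNat_le] at *
  omega

theorem pvHeadIMem (xs : List Char) (h : xs ≠ []) : xs.headI ∈ xs := by
  cases xs with
  | nil => exact absurd rfl h
  | cons a l => exact List.mem_cons_self

theorem pvAlphaFalse (t : List Char) (c : Char) (hc : c ∈ t)
    (hd : PySem.Chars.isdigit c = true) : PySem.Chars.strIsalpha t = false := by
  have : t.all PySem.Chars.isalpha = false := by
    rw [List.all_eq_false]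
    exact ⟨c, hc, by simp [pvDigitNotAlpha c hd]⟩
  simp [PySem.Chars.strIsalpha, this]

theorem pvDigitFalse (t : List Char) (c : Char) (hc : c ∈ t)
    (hd : PySem.Chars.isdigit c = false) : PySem.Chars.strIsdigit t = false := by
  have : t.all PySem.Chars.isdigit = false := by
    rw [List.all_eq_false]
    exact ⟨c, hc, by simp [hd]⟩
  simp [PySem.Chars.strIsdigit, this]

theorem pvBoundBool2 (n b : Int) :
    (!decide (n ≤ 0) && !decide (b ≤ n)) = (decide (0 < n) && decide (n < b)) := by
  by_cases h1 : n ≤ 0 <;> by_cases h2 : b ≤ n <;> simp [h1, h2] <;> omega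

-- two distinct shot letters in one token always fail A's checks
theorem pvBlockPairFalse (t : List Char) (l1 l2 : Char) (b1 b2 : Int)
    (h1 : l1 ∈ t) (h2 : l2 ∈ t) (hne : l1 ≠ l2)
    (hd1 : PySem.Chars.isdigit l1 = false) (hd2 : PySem.Chars.isdigit l2 = false) :
    (pvBlockP t l1 b1 && pvBlockP t l2 b2) = false := by
  by_cases hs1 : PySem.Chars.strIsdigit (t.takeWhile (fun x => !decide (x = l1))) = true
  · by_cases hs2 : PySem.Chars.strIsdigit (t.takeWhile (fun x => !decide (x = l2))) = true
    · have c1 := (pvPassChar l1 hd1 t h1).1.mp hs1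
      have c2 := (pvPassChar l2 hd2 t h2).1.mp hs2
      exact absurd (c1.2.symm.trans c2.2) hne
    · simp [pvBlockP, h2, hs2]
  · simp [pvBlockP, h1, hs1]

-- a single shot letter: A's block ∧ tail agrees with B's letter branch
theorem pvSingleCase (t : List Char) (l : Char) (b : Int)
    (hm : l ∈ t) (hd : PySem.Chars.isdigit l = false) :
    (pvBlockP t l b && pvATail t) =
      (if (t.takeWhile PySem.Chars.isdigit).length = 0 ∨
          (t.drop (t.takeWhile PySem.Chars.isdigit).length).headI ≠ l then false
       else decide (0 < (PySem.Int.ofChars? (t.takeWhile PySem.Chars.isdigit)).getD 0 ∧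
                    (PySem.Int.ofChars? (t.takeWhile PySem.Chars.isdigit)).getD 0 < b)) := by
  by_cases hs : PySem.Chars.strIsdigit (t.takeWhile (fun x => !decide (x = l))) = true
  · obtain ⟨hDne, hhead⟩ := (pvPassChar l hd t hm).1.mp hs
    have hpre := (pvPassChar l hd t hm).2 hDne hhead
    have hdm : (t.takeWhile PySem.Chars.isdigit).headI ∈ t :=
      (List.takeWhile_sublist _).subset (pvHeadIMem _ hDne)
    have halpha : PySem.Chars.strIsalpha t = false :=
      pvAlphaFalse t _ hdm (List.mem_takeWhile_imp (pvHeadIMem _ hDne))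
    have hdig : PySem.Chars.strIsdigit t = false := pvDigitFalse t l hm hd
    rw [if_neg (by simp [hhead, List.length_eq_zero_iff, hDne])]
    have hsD : PySem.Chars.strIsdigit (t.takeWhile PySem.Chars.isdigit) = true := hpre ▸ hs
    simp [pvBlockP, hm, hs, pvATail, halpha, hdig, hpre, hsD, pvBoundBool2]
  · have hnot : ¬ (t.takeWhile PySem.Chars.isdigit ≠ [] ∧
        (t.drop (t.takeWhile PySem.Chars.isdigit).length).headI = l) :=
      fun h => hs ((pvPassChar l hd t hm).1.mpr h)
    rw [if_pos (by
      by_contra hcon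
      push_neg at hcon
      exact hnot ⟨by simpa [List.length_eq_zero_iff] using hcon.1, hcon.2⟩)]
    simp [pvBlockP, hm, hs]

-- the no-letter tail: A's last two checks agree with B's default branch
theorem pvTailEq (t : List Char) :
    pvATail t =
      (if PySem.Chars.strIsalpha t then false
       else if PySem.Chars.strIsdigit t then
         decide (0 < (PySem.Int.ofChars? t).getD 0 ∧ (PySem.Int.ofChars? t).getD 0 < 181)
       else true) := by
  unfold pvATail
  split_ifs <;> simp_all [pvBoundBool2]

theorem pvBlockAbsent (t : List Char) (l : Char) (b : Int) (h : l ∉ t) :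
    pvBlockP t l b = true := by
  simp [pvBlockP, h]

theorem pvTok (t : List Char) : pvAI t = pvTokenOk t := by
  rw [pvChainI, pvChainU, pvChainB, pvChainH]
  simp only [pvTokenOk, pvBounds, pvIsInSingle]
  have hi' := pvMemRest 'i' (by decide) t
  have hu' := pvMemRest 'u' (by decide) t
  have hb' := pvMemRest 'b' (by decide) t
  have hh' := pvMemRest 'h' (by decide) t
  by_cases hi : 'i' ∈ t <;> by_cases hu : 'u' ∈ t <;>
      by_cases hb : 'b' ∈ t <;> by_cases hh : 'h' ∈ t <;>
    simp only [List.filter, hi', hu', hb', hh', hi, hu, hb, hh,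
      decide_true, decide_false, not_false_iff, not_true,
      List.length_cons, List.length_nil, Nat.zero_lt_succ, lt_self_iff_false,
      if_true, if_false, gt_iff_lt]
  · rcases Bool.and_eq_false_iff.mp
        (pvBlockPairFalse t 'i' 'u' 171 171 hi hu (by decide) (by decide) (by decide)) with h | h <;>
      simp [h]
  · rcases Bool.and_eq_false_iff.mp
        (pvBlockPairFalse t 'i' 'u' 171 171 hi hu (by decide) (by decide) (by decide)) with h | h <;>
      simp [h]
  · rcases Bool.and_eq_false_iff.mp
        (pvBlockPairFalse t 'i' 'u' 171 171 hi hu (by decide) (by decide) (by decide)) with h | h <;>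
      simp [h]
  · rcases Bool.and_eq_false_iff.mp
        (pvBlockPairFalse t 'i' 'u' 171 171 hi hu (by decide) (by decide) (by decide)) with h | h <;>
      simp [h]
  · rcases Bool.and_eq_false_iff.mp
        (pvBlockPairFalse t 'i' 'b' 171 10 hi hb (by decide) (by decide) (by decide)) with h | h <;>
      simp [h]
  · rcases Bool.and_eq_false_iff.mp
        (pvBlockPairFalse t 'i' 'b' 171 10 hi hb (by decide) (by decide) (by decide)) with h | h <;>
      simp [h]
  · rcases Bool.and_eq_false_iff.mp
        (pvBlockPairFalse t 'i' 'h' 171 7 hi hh (by decide) (by decide) (by decide)) with h | h <;>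
      simp [h]
  · simp only [pvBlockAbsent _ _ _ hu, pvBlockAbsent _ _ _ hb, pvBlockAbsent _ _ _ hh,
      Bool.true_and]
    rw [pvSingleCase t 'i' 171 hi (by decide)]
  · rcases Bool.and_eq_false_iff.mp
        (pvBlockPairFalse t 'u' 'b' 171 10 hu hb (by decide) (by decide) (by decide)) with h | h <;>
      simp [h]
  · rcases Bool.and_eq_false_iff.mp
        (pvBlockPairFalse t 'u' 'b' 171 10 hu hb (by decide) (by decide) (by decide)) with h | h <;>
      simp [h]
  · rcases Bool.and_eq_false_iff.mp
        (pvBlockPairFalse t 'u' 'h' 171 7 hu hh (by decide) (by decide) (by decide)) with h | h <;>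
      simp [h]
  · simp only [pvBlockAbsent _ _ _ hi, pvBlockAbsent _ _ _ hb, pvBlockAbsent _ _ _ hh,
      Bool.true_and]
    rw [pvSingleCase t 'u' 171 hu (by decide)]
  · rcases Bool.and_eq_false_iff.mp
        (pvBlockPairFalse t 'b' 'h' 10 7 hb hh (by decide) (by decide) (by decide)) with h | h <;>
      simp [h]
  · simp only [pvBlockAbsent _ _ _ hi, pvBlockAbsent _ _ _ hu, pvBlockAbsent _ _ _ hh,
      Bool.true_and]
    rw [pvSingleCase t 'b' 10 hb (by decide)]
  · simp only [pvBlockAbsent _ _ _ hi, pvBlockAbsent _ _ _ hu, pvBlockAbsent _ _ _ hb,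
      Bool.true_and]
    rw [pvSingleCase t 'h' 7 hh (by decide)]
  · simp only [pvBlockAbsent _ _ _ hi, pvBlockAbsent _ _ _ hu, pvBlockAbsent _ _ _ hb,
      pvBlockAbsent _ _ _ hh, Bool.true_and]
    rw [pvTailEq]

-- ===== VERDICT (by name: the statement is the Claim_ definition above) =====
theorem validate_quality_point_string_spec : Claim_equal_validate_quality_point_string := by
  intro string _
  unfold Spec_validate_quality_point_string
  unfold validate_quality_point_string validate_quality_point_string_alt
  simp only [List.isEmpty_iff, beq_iff_eq, List.length_eq_zero_iff]
  rw [funext pvTok]
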